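-- pv_equiv track=rewrite | github.com/RebeccaStevenson/talon_rebecca | system/audio_switcher.py | best_device_match
-- ===== SOURCE A (Python) =====
-- def best_device_match(devices: list[str], desired: str) -> str | None:
--     """Return the best device match by exact, case-insensitive, then substring match."""
--     desired_stripped = desired.strip()
--     if not desired_stripped:
--         return None
--
--     for device in devices:
--         if device == desired_stripped:
--             return device
--
--     desired_lower = desired_stripped.lower()
--     for device in devices:
--         if device.lower() == desired_lower:
--             return device
--
--     for device in devices:
--         if desired_lower in device.lower():
--             return device
--
--     return None
-- ===== SOURCE B (Python) =====
-- def best_device_match(devices: list[str], desired: str) -> str | None: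
--     """Single pass: return exact match immediately; record first case-insensitive
--     and first substring candidates; pick by priority at the end."""
--     desired_stripped = desired.strip()
--     if not desired_stripped:
--         return None
--     desired_lower = desired_stripped.lower()
--     ci = None
--     sub = None
--     for device in devices:
--         if device == desired_stripped:
--             return device
--         device_lower = device.lower()
--         if ci is None and device_lower == desired_lower:
--             ci = device
--         if sub is None and desired_lower in device_lower:
--             sub = device
--     return ci if ci is not None else sub
-- ===== Notes on version B (the rewrite author's own statement) =====
-- stated objective: alternative
-- what changed: Replaces A's three sequential scans of the device list by a single pass that returns on exact match and records the first case-insensitive and first substring candidates in two option slots, choosing by priority after the loop.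
import Mathlib
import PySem

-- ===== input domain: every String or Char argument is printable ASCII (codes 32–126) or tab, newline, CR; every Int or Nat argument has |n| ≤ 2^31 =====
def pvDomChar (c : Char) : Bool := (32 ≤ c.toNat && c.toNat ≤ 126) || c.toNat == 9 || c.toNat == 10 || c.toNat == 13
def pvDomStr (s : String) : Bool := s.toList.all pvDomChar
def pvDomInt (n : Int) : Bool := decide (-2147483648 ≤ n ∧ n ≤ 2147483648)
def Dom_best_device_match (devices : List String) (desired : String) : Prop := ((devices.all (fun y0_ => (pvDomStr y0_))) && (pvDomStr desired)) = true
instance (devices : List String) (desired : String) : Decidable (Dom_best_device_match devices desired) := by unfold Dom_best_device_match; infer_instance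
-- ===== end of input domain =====

-- ===== PORT A =====
-- B replaces A's three sequential scans by a single pass with two candidate slots (alternative decomposition, same cost).
def best_device_match (devices : List String) (desired : String) : Option String :=
  let desired_stripped := PySem.Str.strip desired
  if desired_stripped = "" then none
  else
    match devices.find? (fun device => device == desired_stripped) with
    | some device => some device
    | none =>
      let desired_lower := PySem.Str.lower desired_stripped
      match devices.find? (fun device => PySem.Str.lower device == desired_lower) with
      | some device => some device
      | none => devices.find? (fun device => PySem.Str.isIn desired_lower (PySem.Str.lower device))

-- ===== PORT B =====
-- the single loop of Source B: immediate return on exact match, two never-overwritten candidate slots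
def bdmLoop (desired_stripped desired_lower : String) (ci sub : Option String) :
    List String → Option String
  | [] => match ci with | some c => some c | none => sub
  | device :: rest =>
    if device == desired_stripped then some device
    else
      let device_lower := PySem.Str.lower device
      let ci' := if ci = none ∧ device_lower == desired_lower then some device else ci
      let sub' := if sub = none ∧ PySem.Str.isIn desired_lower device_lower then some device else sub
      bdmLoop desired_stripped desired_lower ci' sub' rest

def best_device_match_alt (devices : List String) (desired : String) : Option String :=
  let desired_stripped := PySem.Str.strip desired
  if desired_stripped = "" then none
  else bdmLoop desired_stripped (PySem.Str.lower desired_stripped) none none devices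

-- ===== PRECONDITION & SPEC =====
def Spec_best_device_match (devices : List String) (desired : String) (out : Option String) : Prop := out = best_device_match_alt devices desired
instance (devices : List String) (desired : String) (out : Option String) : Decidable (Spec_best_device_match devices desired out) := by unfold Spec_best_device_match; infer_instance

-- ===== CLAIM (what is proved, stated in full; the proofs are below) =====
def Claim_equal_best_device_match : Prop := ∀ (devices : List String) (desired : String), Dom_best_device_match devices desired → Spec_best_device_match devices desired (best_device_match devices desired)

-- ===== LEMMAS AND PROOFS =====

/-- Loop invariant: the single pass with candidate slots equals A's three-pass
    structure with the slots taking priority over the remaining scans. -/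
theorem bdmLoop_eq (ds dl : String) (ci sub : Option String) (l : List String) :
    bdmLoop ds dl ci sub l =
      ((l.find? (fun d => d == ds)).orElse (fun _ =>
        (ci.orElse (fun _ => l.find? (fun d => PySem.Str.lower d == dl))).orElse (fun _ =>
          sub.orElse (fun _ => l.find? (fun d => PySem.Str.isIn dl (PySem.Str.lower d)))))) := by
  induction l generalizing ci sub with
  | nil => cases ci <;> cases sub <;> simp [bdmLoop, Option.orElse]
  | cons d rest ih =>
    by_cases hx : (d == ds) = true
    · simp [bdmLoop, hx, List.find?, Option.orElse]
    · rw [show bdmLoop ds dl ci sub (d :: rest) =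
        bdmLoop ds dl
          (if ci = none ∧ (PySem.Str.lower d == dl) = true then some d else ci)
          (if sub = none ∧ PySem.Str.isIn dl (PySem.Str.lower d) = true then some d else sub)
          rest by simp [bdmLoop, hx]]
      rw [ih]
      cases ci <;> cases sub <;>
        by_cases hc : (PySem.Str.lower d == dl) = true <;>
        by_cases hs : PySem.Chars.isIn dl.toList (PySem.Chars.lower d.toList) = true <;>
          simp [List.find?, hx, hc, hs, PySem.Str.isIn, Option.orElse]

-- ===== VERDICT (by name: the statement is the Claim_ definition above) =====
theorem best_device_match_spec : Claim_equal_best_device_match := by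
  intro devices desired _
  unfold Spec_best_device_match best_device_match best_device_match_alt
  by_cases h : PySem.Str.strip desired = ""
  · simp [h]
  · simp only [h, if_false]
    rw [bdmLoop_eq]
    cases hf : devices.find? (fun d => d == PySem.Str.strip desired) with
    | some d => simp [Option.orElse]
    | none =>
      cases hc : devices.find? (fun d => PySem.Str.lower d == PySem.Str.lower (PySem.Str.strip desired)) with
      | some d => simp [Option.orElse]
      | none => simp [Option.orElse]
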